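-- pv_equiv track=rewrite | github.com/3LENDERMAN/Python_projects | 02/joined.py | joined
-- ===== SOURCE A (Python) =====
-- def joined(start,count):
--     total_length = 0
--     length = 0
--     final_sum = 0
--     for i in range(start + count - 1, start - 1, -1):
--         curr_number = to_binary(i)
--         length = get_length(curr_number)
--         for x in range(1, length + 1):
--             val = get_digit(curr_number, x)
--             if val == 1:
--                 final_sum += 2 ** total_length
--             total_length += 1
--     return final_sum
--
-- def get_digit(number, index):
--     digit = 0
--     while index > 0:
--         digit = number % 2
--         number //= 10
--         index -= 1
--     return digit
--
-- def get_length(number):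
--     count = 0
--     while number > 0:
--         number //= 10
--         count += 1
--     return count
--
-- def to_binary(number):
--     if number == 0:
--         return 0
--     value = 0
--     power = 1
--     while number > 0:
--         value += number % 2 * power
--         number //= 2
--         power *= 10
--
--     return value
-- ===== SOURCE B (Python) =====
-- def joined(start, count):
--     # Build the concatenated number arithmetically: shift each value into place
--     # with << and advance the offset by its bit length.
--     final_sum = 0
--     shift = 0
--     for i in range(start + count - 1, start - 1, -1):
--         if i > 0:
--             final_sum += i << shift
--             shift += i.bit_length()
--     return final_sum
-- ===== Notes on version B (the rewrite author's own statement) =====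
-- stated objective: faster
-- what changed: B drops A's decimal re-encoding of the binary representation and its per-bit inner loop (to_binary/get_length/get_digit with repeated 2**total_length powers); it shifts each value into place with i << shift and advances shift by i.bit_length().
import Mathlib
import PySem

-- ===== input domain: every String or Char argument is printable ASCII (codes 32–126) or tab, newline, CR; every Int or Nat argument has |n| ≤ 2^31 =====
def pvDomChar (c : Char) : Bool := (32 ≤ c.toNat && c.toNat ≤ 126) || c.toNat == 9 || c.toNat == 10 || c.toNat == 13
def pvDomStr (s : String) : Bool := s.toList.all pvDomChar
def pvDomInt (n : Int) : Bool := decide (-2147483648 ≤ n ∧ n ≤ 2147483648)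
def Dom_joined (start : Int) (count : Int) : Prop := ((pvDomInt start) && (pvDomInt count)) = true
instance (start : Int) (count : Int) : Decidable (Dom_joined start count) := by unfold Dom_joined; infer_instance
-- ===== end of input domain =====

-- B replaces A's decimal-encoded binary digits and per-bit inner loop by shifting each
-- value into place with << and advancing the offset by bit_length (objective: faster).


-- ===== PORT A =====
-- termination helper for the //-halving and //10 while loops
theorem pv_floordiv_toNat_lt (n k : Int) (hn : 0 < n) (hk : 1 < k) :
    (PySem.Int.floordiv n k).toNat < n.toNat := by
  have h1 : PySem.Int.floordiv n k < n := by
    rw [PySem.Int.floordiv_lt_iff_lt_mul (by omega)]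
    nlinarith
  have h2 : 0 ≤ PySem.Int.floordiv n k := PySem.Int.floordiv_nonneg (by omega) (by omega)
  omega

-- while index > 0: digit = number % 2; number //= 10; index -= 1
def getDigitGo (number index digit : Int) : Int :=
  if 0 < index then
    getDigitGo (PySem.Int.floordiv number 10) (index - 1) (PySem.Int.mod number 2)
  else digit
termination_by index.toNat
decreasing_by omega

def getDigit (number index : Int) : Int := getDigitGo number index 0

-- while number > 0: number //= 10; count += 1
def getLengthGo (number count : Int) : Int :=
  if h : 0 < number then getLengthGo (PySem.Int.floordiv number 10) (count + 1) else count
termination_by number.toNat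
decreasing_by exact pv_floordiv_toNat_lt number 10 h (by omega)

def getLength (number : Int) : Int := getLengthGo number 0

-- while number > 0: value += number % 2 * power; number //= 2; power *= 10
def toBinaryGo (number value power : Int) : Int :=
  if h : 0 < number then
    toBinaryGo (PySem.Int.floordiv number 2) (value + PySem.Int.mod number 2 * power) (power * 10)
  else value
termination_by number.toNat
decreasing_by exact pv_floordiv_toNat_lt number 2 h (by omega)

def toBinary (number : Int) : Int := if number = 0 then 0 else toBinaryGo number 0 1

-- inner 'for x in range(1, length+1)' body; state = (final_sum, total_length).
-- total_length is 0 and only incremented, so 2 ** total_length is 2 ^ st.2.toNat.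
def innerStep (curr : Int) (st : Int × Int) (x : Int) : Int × Int :=
  let val := getDigit curr x
  ((if val = 1 then st.1 + 2 ^ st.2.toNat else st.1), st.2 + 1)

-- outer loop body; state = (total_length, length, final_sum)
def outerStepA (st : Int × Int × Int) (i : Int) : Int × Int × Int :=
  let curr := toBinary i
  let length := getLength curr
  let inner := (PySem.List.pyRange 1 (length + 1) 1).foldl (innerStep curr) (st.2.2, st.1)
  (inner.2, length, inner.1)

def joined (start : Int) (count : Int) : Int :=
  ((PySem.List.pyRange (start + count - 1) (start - 1) (-1)).foldl outerStepA (0, 0, 0)).2.2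

-- ===== PORT B =====
-- state = (final_sum, shift); shift only grows from 0, so it is a Nat
def outerStepB (st : Int × Nat) (i : Int) : Int × Nat :=
  if 0 < i then (st.1 + (i <<< st.2), st.2 + PySem.Int.bitLength i) else st

def joined_alt (start : Int) (count : Int) : Int :=
  ((PySem.List.pyRange (start + count - 1) (start - 1) (-1)).foldl outerStepB (0, 0)).1

-- ===== PRECONDITION & SPEC =====
def Spec_joined (start : Int) (count : Int) (out : Int) : Prop := out = joined_alt start count
instance (start : Int) (count : Int) (out : Int) : Decidable (Spec_joined start count out) := by unfold Spec_joined; infer_instance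

-- ===== CLAIM (what is proved, stated in full; the proofs are below) =====
def Claim_equal_joined : Prop := ∀ (start : Int) (count : Int), Dom_joined start count → Spec_joined start count (joined start count)

-- ===== LEMMAS AND PROOFS =====

-- recursive characterisation of A's to_binary accumulator loop
def tb (m : Int) : Int :=
  if h : 0 < m then PySem.Int.mod m 2 + 10 * tb (PySem.Int.floordiv m 2) else 0
termination_by m.toNat
decreasing_by exact pv_floordiv_toNat_lt m 2 h (by omega)

theorem tb_nonneg (m : Int) : 0 ≤ tb m := by
  induction m using tb.induct with
  | case1 m h ih =>
      rw [tb, dif_pos h]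
      have := PySem.Int.mod_nonneg m (b := 2) (by omega)
      omega
  | case2 m h => rw [tb, dif_neg h]

theorem tb_pos (m : Int) (hm : 0 < m) : 0 < tb m := by
  induction m using tb.induct with
  | case1 m h ih =>
      rw [tb, dif_pos h]
      have hb := PySem.Int.mod_two_eq m
      by_cases h2 : PySem.Int.floordiv m 2 = 0
      · have := PySem.Int.floordiv_mul_add_mod m 2
        rw [h2] at this ⊢
        rw [tb, dif_neg (by omega)]
        omega
      · have h2' : 0 < PySem.Int.floordiv m 2 :=
          lt_of_le_of_ne (PySem.Int.floordiv_nonneg (by omega) (by omega)) (Ne.symm h2)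
        have := ih h2'
        omega
  | case2 m h => omega

theorem tb_eq_of_pos (m : Int) (hm : 0 < m) :
    tb m = PySem.Int.mod m 2 + 10 * tb (PySem.Int.floordiv m 2) := by
  rw [tb, dif_pos hm]

theorem floordiv_digit (b t : Int) (hb0 : 0 ≤ b) (hb : b < 10) (_ht : 0 ≤ t) :
    PySem.Int.floordiv (b + 10 * t) 10 = t := by
  rw [PySem.Int.floordiv_eq_iff_of_pos (by omega)]
  omega

theorem mod_digit (b t : Int) (hb0 : 0 ≤ b) (hb : b < 2) (_ht : 0 ≤ t) :
    PySem.Int.mod (b + 10 * t) 2 = b := by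
  rw [PySem.Int.mod_eq_emod_of_pos (by omega)]
  omega

theorem toBinaryGo_eq (m : Int) : ∀ v p, toBinaryGo m v p = v + p * tb m := by
  induction m using tb.induct with
  | case1 m h ih =>
      intro v p
      rw [toBinaryGo, dif_pos h, tb_eq_of_pos m h, ih]
      ring
  | case2 m h =>
      intro v p
      rw [toBinaryGo, dif_neg h, tb, dif_neg h]
      ring

theorem toBinary_eq (m : Int) : toBinary m = tb m := by
  unfold toBinary
  by_cases h : m = 0
  · rw [if_pos h, h, tb, dif_neg (by omega)]
  · rw [if_neg h, toBinaryGo_eq]; ring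

theorem getLengthGo_tb (m : Int) (hm : 0 ≤ m) : ∀ c, getLengthGo (tb m) c = c + PySem.Int.bitLength m := by
  induction m using tb.induct with
  | case1 m h ih =>
      intro c
      have hb := PySem.Int.mod_two_eq m
      have ht := tb_nonneg (PySem.Int.floordiv m 2)
      rw [getLengthGo, dif_pos (tb_pos m h), tb_eq_of_pos m h,
        floordiv_digit _ _ (by omega) (by omega) ht,
        ih (PySem.Int.floordiv_nonneg (by omega) (by omega)),
        PySem.Int.bitLength_of_pos h]
      push_cast
      ring
  | case2 m h =>
      intro c
      have hm0 : m = 0 := by omega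
      subst hm0
      rw [tb, dif_neg (by omega), getLengthGo, dif_neg (by omega)]
      simp [PySem.Int.bitLength_zero]

theorem getDigitGo_irrel (n idx d d' : Int) (h : 0 < idx) :
    getDigitGo n idx d = getDigitGo n idx d' := by
  conv_lhs => rw [getDigitGo]
  conv_rhs => rw [getDigitGo]
  rw [if_pos h, if_pos h]

theorem getDigit_one (b t : Int) (hb0 : 0 ≤ b) (hb : b < 2) (ht : 0 ≤ t) :
    getDigit (b + 10 * t) 1 = b := by
  unfold getDigit
  rw [getDigitGo, if_pos (by omega : (0:Int) < 1), getDigitGo,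
    if_neg (by omega : ¬ (0:Int) < 1 - 1), mod_digit b t hb0 hb ht]

theorem getDigit_shift (x b t : Int) (hx : 0 < x) (hb0 : 0 ≤ b) (hb : b < 2) (ht : 0 ≤ t) :
    getDigit (b + 10 * t) (x + 1) = getDigit t x := by
  unfold getDigit
  rw [getDigitGo, if_pos (by omega : (0:Int) < x + 1),
    floordiv_digit b t (by omega) (by omega) ht,
    show x + 1 - 1 = x by ring]
  exact getDigitGo_irrel t x _ 0 hx

theorem rest_fold (m : Int) (h : 0 < m) (L' : Int) (s : Int × Int) :
    (PySem.List.pyRange 2 (L' + 2) 1).foldl (innerStep (tb m)) s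
      = (PySem.List.pyRange 1 (L' + 1) 1).foldl (innerStep (tb (PySem.Int.floordiv m 2))) s := by
  have hb := PySem.Int.mod_two_eq m
  have ht := tb_nonneg (PySem.Int.floordiv m 2)
  rw [PySem.List.pyRange_one 2 (L' + 2), PySem.List.pyRange_one 1 (L' + 1),
    show L' + 2 - 2 = L' + 1 - 1 by ring, List.foldl_map, List.foldl_map]
  apply PySem.List.foldl_congr_mem
  intro acc k _
  simp only [innerStep]
  rw [tb_eq_of_pos m h, show (2:Int) + (k:Int) = (1 + (k:Int)) + 1 by ring,
    getDigit_shift (1 + (k:Int)) _ _ (by omega) (by omega) (by omega) ht]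

theorem inner_fold_eq (m : Int) (hm : 0 ≤ m) : ∀ fs tl, 0 ≤ tl →
    (PySem.List.pyRange 1 ((PySem.Int.bitLength m : Int) + 1) 1).foldl (innerStep (tb m)) (fs, tl)
      = (fs + m * 2 ^ tl.toNat, tl + (PySem.Int.bitLength m : Int)) := by
  induction m using tb.induct with
  | case1 m h ih =>
      intro fs tl htl
      have hb := PySem.Int.mod_two_eq m
      have hfd0 : 0 ≤ PySem.Int.floordiv m 2 := PySem.Int.floordiv_nonneg (by omega) (by omega)
      have hL : (PySem.Int.bitLength m : Int) = (PySem.Int.bitLength (PySem.Int.floordiv m 2) : Int) + 1 := by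
        rw [PySem.Int.bitLength_of_pos h]; push_cast; ring
      have hL'0 : (0:Int) ≤ (PySem.Int.bitLength (PySem.Int.floordiv m 2) : Int) := Int.natCast_nonneg _
      rw [hL, PySem.List.pyRange_one_cons (by omega), List.foldl_cons]
      have hstep : innerStep (tb m) (fs, tl) 1
          = (fs + PySem.Int.mod m 2 * 2 ^ tl.toNat, tl + 1) := by
        simp only [innerStep]
        rw [tb_eq_of_pos m h, getDigit_one _ _ (by omega) (by omega) (tb_nonneg _)]
        rcases hb with hb | hb <;> rw [hb] <;> norm_num
      rw [hstep, show (1:Int) + 1 = 2 by ring,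
        show (PySem.Int.bitLength (PySem.Int.floordiv m 2) : Int) + 1 + 1
          = (PySem.Int.bitLength (PySem.Int.floordiv m 2) : Int) + 2 by ring,
        rest_fold m h _ _, ih hfd0 _ (tl + 1) (by omega)]
      have hm2 := PySem.Int.floordiv_mul_add_mod m 2
      have htn : (tl + 1).toNat = tl.toNat + 1 := by omega
      simp only [Prod.mk.injEq]
      constructor
      · rw [htn, pow_succ]; linear_combination 2 ^ tl.toNat * hm2
      · ring
  | case2 m h =>
      intro fs tl htl
      have hm0 : m = 0 := by omega
      subst hm0
      rw [show ((PySem.Int.bitLength (0:Int) : Int) + 1) = 1 by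
          rw [PySem.Int.bitLength_zero]; ring,
        PySem.List.pyRange_one_eq_nil (le_refl 1)]
      simp [PySem.Int.bitLength_zero]

theorem fold_eq (l : List Int) : ∀ (fs len : Int) (sh : Nat),
    (l.foldl outerStepA ((sh : Int), len, fs)).2.2 = (l.foldl outerStepB (fs, sh)).1 := by
  induction l with
  | nil => intro fs len sh; rfl
  | cons i l ih =>
      intro fs len sh
      rw [List.foldl_cons, List.foldl_cons]
      by_cases hi : 0 < i
      · have hA : outerStepA ((sh : Int), len, fs) i
            = (((sh + PySem.Int.bitLength i : Nat) : Int),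
               (PySem.Int.bitLength i : Int), fs + i * 2 ^ sh) := by
          simp only [outerStepA]
          rw [toBinary_eq]
          have hlen : getLength (tb i) = (PySem.Int.bitLength i : Int) := by
            unfold getLength; rw [getLengthGo_tb i (by omega) 0]; ring
          rw [hlen, inner_fold_eq i (by omega) fs ((sh : Int)) (Int.natCast_nonneg _)]
          simp only [Int.toNat_natCast, Prod.mk.injEq]
          push_cast
          simp
        have hB : outerStepB (fs, sh) i = (fs + i * 2 ^ sh, sh + PySem.Int.bitLength i) := by
          simp only [outerStepB, if_pos hi, Int.shiftLeft_eq]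
        rw [hA, hB]
        exact ih _ _ _
      · have hA : outerStepA ((sh : Int), len, fs) i = ((sh : Int), 0, fs) := by
          simp only [outerStepA]
          rw [toBinary_eq, tb, dif_neg hi]
          have h0 : getLength (0 : Int) = 0 := by
            unfold getLength; rw [getLengthGo, dif_neg (by omega)]
          rw [h0, show (0:Int) + 1 = 1 by ring, PySem.List.pyRange_one_eq_nil (le_refl 1)]
          rfl
        have hB : outerStepB (fs, sh) i = (fs, sh) := by
          simp only [outerStepB, if_neg hi]
        rw [hA, hB]
        exact ih _ _ _

-- ===== VERDICT (by name: the statement is the Claim_ definition above) =====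
theorem joined_spec : Claim_equal_joined := by
  intro start count _
  unfold Spec_joined joined joined_alt
  exact fold_eq _ 0 0 0
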